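-- pv_equiv track=rewrite | github.com/sungin95/TIL | python/코드테스트(연습)/백준/23y01m/햄버거만들기.py | solution
-- ===== SOURCE A (Python) =====
-- from collections import deque
--
-- def solution(ingredient):
--     cnt = 0
--     ingredient = deque(ingredient)
--     check = False
--     rest = deque()
--     while True:
--         if check == False:
--
--             for i in range(len(ingredient)):
--                 i = 0
--                 if (
--                     i + 3 <= len(ingredient)
--                     and ingredient[i] == 1
--                     and ingredient[i + 1] == 2
--                     and ingredient[i + 2] == 3
--                     and ingredient[i + 3] == 1
--                 ):
--                     cnt += 1
--                     ingredient.popleft()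
--                     ingredient.popleft()
--                     ingredient.popleft()
--                     ingredient.popleft()
--                     if len(rest) > 4:
--                         for j in range(4):
--                             b = rest.pop()
--                             ingredient.appendleft(b)
--                     else:
--                         ingredient = rest + ingredient
--                         rest = deque()
--                     break
--                 a = ingredient.popleft()
--                 rest.append(a)
--             else:
--                 check = True
--         else:
--             break
--     answer = cnt
--     return answer
-- ===== SOURCE B (Python) =====
-- def solution(ingredient):
--     answer = 0
--     stack = []
--     for x in ingredient:
--         stack.append(x)
--         if stack[-4:] == [1, 2, 3, 1]:
--             del stack[-4:]
--             answer += 1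
--     return answer
-- ===== Notes on version B (the rewrite author's own statement) =====
-- stated objective: simpler
-- what changed: Replaced A's two-deque loop (scan the front for 1,2,3,1, pop it, move up to four already-scanned elements back, restart the scan) with the standard single left-to-right pass that pushes each element on one stack and pops four (counting one removal) whenever the top four are [1,2,3,1]; Pre_ excludes exactly the inputs whose stack-collapse residue ends with 1,2,3, on which A raises IndexError ('deque index out of range').
import Mathlib
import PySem

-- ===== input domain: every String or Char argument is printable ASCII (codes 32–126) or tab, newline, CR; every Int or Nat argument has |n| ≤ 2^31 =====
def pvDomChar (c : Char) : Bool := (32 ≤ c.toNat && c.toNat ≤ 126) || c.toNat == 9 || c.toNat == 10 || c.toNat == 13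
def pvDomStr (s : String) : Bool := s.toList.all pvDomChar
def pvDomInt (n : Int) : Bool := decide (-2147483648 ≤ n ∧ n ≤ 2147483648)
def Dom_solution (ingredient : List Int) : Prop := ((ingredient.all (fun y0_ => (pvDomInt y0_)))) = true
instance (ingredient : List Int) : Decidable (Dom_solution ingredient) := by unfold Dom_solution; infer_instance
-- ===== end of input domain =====

-- B replaces A's two-deque scan-and-restore loop with the standard single stack pass: simpler, same cost.


-- ===== PORT A =====
-- Inner 'for i in range(len(ingredient))' loop of A; the fuel argument is len(ingredient) at loop entry
-- (each iteration either breaks, raises, or moves one element, so the deque is never empty mid-loop).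
-- Deque indexing ingredient[0..2] under the guard 'i + 3 <= len' (i is always 0) is the three-cons pattern
-- match (exact: the guard is exactly '3 ≤ length'); 'ingredient[3]' on a 3-element deque raises IndexError,
-- mirrored by 'none'.  Returns: none = IndexError, Sum.inr cnt = for-else fell through (check = True),
-- Sum.inl (cnt, ingredient, rest) = break after a removal and the rest-restoring step.
def solInner : Nat → Int → List Int → List Int → Option ((Int × List Int × List Int) ⊕ Int)
  | 0, cnt, _ing, _rest => some (Sum.inr cnt)
  | k + 1, cnt, ing, rest =>
    match ing with
    | [] => none                      -- popleft from an empty deque (unreachable with fuel = length)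
    | x0 :: tl =>
      match tl with
      | x1 :: x2 :: tl' =>            -- here i + 3 <= len(ingredient)
        if x0 = 1 ∧ x1 = 2 ∧ x2 = 3 then
          match tl' with
          | [] => none                -- ingredient[3]: IndexError 'deque index out of range'
          | x3 :: tl'' =>
            if x3 = 1 then            -- pattern found: cnt += 1, pop 4 from the left, restore from rest
              if 4 < rest.length then -- move rest's last 4 back to the front
                some (Sum.inl (cnt + 1, rest.drop (rest.length - 4) ++ tl'', rest.take (rest.length - 4)))
              else                    -- ingredient = rest + ingredient; rest = deque()
                some (Sum.inl (cnt + 1, rest ++ tl'', []))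
            else
              solInner k cnt tl (rest ++ [x0])   -- a = popleft(); rest.append(a)
        else
          solInner k cnt tl (rest ++ [x0])
      | _ => solInner k cnt tl (rest ++ [x0])    -- i + 3 <= len fails
-- Outer 'while True' loop of A.  The fuel len+1 is proved sufficient below (each removal shrinks
-- len(ingredient)+len(rest) by 4); on inputs where A raises IndexError the port yields 'none'.
def solOuter : Nat → Int → List Int → List Int → Option Int
  | 0, _cnt, _ing, _rest => none
  | f + 1, cnt, ing, rest =>
    match solInner ing.length cnt ing rest with
    | none => none
    | some (Sum.inr c) => some c                        -- check = True, outer loop breaks, return cnt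
    | some (Sum.inl (c, ing', rest')) => solOuter f c ing' rest'

def solution (ingredient : List Int) : Int :=
  (solOuter (ingredient.length + 1) 0 ingredient []).getD 0   -- .getD 0 is never reached on Pre_ inputs

-- ===== PORT B =====
-- One pass: push each element; 'stack[-4:] == [1,2,3,1]' is exactly 'drop (length-4) = [1,2,3,1]'
-- (for length < 4 both sides are the whole stack, which cannot equal a 4-element list);
-- 'del stack[-4:]' is 'take (length-4)'.
def altStep (s : Int × List Int) (x : Int) : Int × List Int :=
  let st := s.2 ++ [x]
  if st.drop (st.length - 4) = [1, 2, 3, 1] then (s.1 + 1, st.take (st.length - 4)) else (s.1, st)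

def solution_alt (ingredient : List Int) : Int :=
  (ingredient.foldl altStep (0, [])).1

-- ===== PRECONDITION & SPEC =====
-- Stack-collapse residue of the input (helper for Pre_/Raises_ only; independent of both ports).
def collapse (stack : List Int) (x : Int) : List Int :=
  let st := stack ++ [x]
  if st.drop (st.length - 4) = [1, 2, 3, 1] then st.take (st.length - 4) else st

-- Pre_ excludes exactly the inputs on which A raises IndexError ('deque index out of range'):
-- those whose stack-collapse residue ends with 1, 2, 3 (e.g. [1,2,3]).  A returns on everything else.
def Pre_solution (ingredient : List Int) : Prop :=
  ¬ [1, 2, 3] <:+ ingredient.foldl collapse []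
instance (ingredient : List Int) : Decidable (Pre_solution ingredient) := by
  unfold Pre_solution; infer_instance

def pvWitness_solution : List Int := [1, 2, 3, 1]

def Spec_solution (ingredient : List Int) (out : Int) : Prop := out = solution_alt ingredient
instance (ingredient : List Int) (out : Int) : Decidable (Spec_solution ingredient out) := by
  unfold Spec_solution; infer_instance

-- ===== CLAIM (what is proved, stated in full; the proofs are below) =====
def Claim_equal_solution : Prop := ∀ (ingredient : List Int), Dom_solution ingredient → Pre_solution ingredient → Spec_solution ingredient (solution ingredient)

-- ===== LEMMAS AND PROOFS =====

-- Invariant of A's loop state: no occurrence of [1,2,3,1] begins strictly inside 'rest'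
-- (neither wholly inside it nor crossing the rest/ingredient boundary).
def pvInv (rest ing : List Int) : Prop :=
  ∀ s : List Int, s <:+ rest → s ≠ [] → ¬ ([1, 2, 3, 1] <+: s ++ ing)

lemma pvInv_nil (ing : List Int) : pvInv [] ing := by
  intro s hs hne
  simp [List.suffix_nil] at hs
  exact absurd hs hne

lemma inv_no_pat_prefix {rest ing : List Int} (h : pvInv rest ing) :
    ∀ w, w <+: rest → ¬ [1, 2, 3, 1] <:+ w := by
  intro w hw hpat
  obtain ⟨t, ht⟩ := hw            -- w ++ t = rest
  obtain ⟨u, hu⟩ := hpat          -- u ++ [1,2,3,1] = w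
  exact h ([1, 2, 3, 1] ++ t) ⟨u, by rw [← List.append_assoc, hu, ht]⟩ (by simp)
    ⟨t ++ ing, by simp⟩

-- the pop condition of altStep, characterised
lemma pop_iff (st : List Int) (x : Int) :
    ((st ++ [x]).drop ((st ++ [x]).length - 4) = [1, 2, 3, 1]) ↔ ([1, 2, 3] <:+ st ∧ x = 1) := by
  by_cases h3 : 3 ≤ st.length
  · have hlen : (st ++ [x]).length - 4 = st.length - 3 := by
      simp only [List.length_append, List.length_cons, List.length_nil]
      omega
    have hle : st.length - 3 ≤ st.length := by omega
    have hd : (st ++ [x]).drop ((st ++ [x]).length - 4) = st.drop (st.length - 3) ++ [x] := by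
      rw [hlen, List.drop_append_of_le_length hle]
    rw [hd]
    constructor
    · intro h
      have h' : st.drop (st.length - 3) ++ [x] = [1, 2, 3] ++ [1] := by simpa using h
      have hinj := List.append_inj' h' (by simp)
      have h1 : [1, 2, 3] <:+ st := List.suffix_iff_eq_drop.2 (by simpa using hinj.1.symm)
      have h2 : x = 1 := by simpa using hinj.2
      exact ⟨h1, h2⟩
    · rintro ⟨hs, rfl⟩
      have hds := List.suffix_iff_eq_drop.1 hs
      simp at hds
      rw [← hds]
      rfl
  · constructor
    · intro h
      have := congrArg List.length h
      simp at this
      omega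
    · rintro ⟨hs, rfl⟩
      have := hs.length_le
      simp at this
      omega

lemma altStep_no_pop (c : Int) (st : List Int) (x : Int) (h : ¬ ([1, 2, 3] <:+ st ∧ x = 1)) :
    altStep (c, st) x = (c, st ++ [x]) := by
  simp only [altStep]
  rw [if_neg]
  exact fun hc => h ((pop_iff st x).1 hc)

lemma altStep_pop (c : Int) (u : List Int) : altStep (c, u ++ [1, 2, 3]) 1 = (c + 1, u) := by
  have hcond := (pop_iff (u ++ [1, 2, 3]) 1).2 ⟨⟨u, rfl⟩, rfl⟩
  simp only [altStep]
  rw [if_pos hcond]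
  congr 1
  have h2 : ((u ++ [1, 2, 3]) ++ [1]).length - 4 = u.length := by simp
  have h1 : (u ++ [1, 2, 3]) ++ [1] = u ++ [1, 2, 3, 1] := by simp
  rw [h2, h1, List.take_left]

lemma foldl_no_pop : ∀ (v u : List Int) (c : Int),
    (∀ w, w <+: v → ¬ [1, 2, 3, 1] <:+ (u ++ w)) →
    List.foldl altStep (c, u) v = (c, u ++ v) := by
  intro v
  induction v with
  | nil => intro u c _; simp
  | cons x v' ih =>
    intro u c h
    rw [List.foldl_cons, altStep_no_pop c u x ?nopop]
    case nopop =>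
      rintro ⟨⟨t, ht⟩, rfl⟩
      exact h [1] ⟨v', rfl⟩ ⟨t, by rw [← ht]; simp⟩
    rw [ih (u ++ [x]) c ?h']
    · simp
    case h' =>
      intro w hw
      have : (u ++ [x]) ++ w = u ++ (x :: w) := by simp
      rw [this]
      exact h (x :: w) (by exact (List.cons_prefix_cons).2 ⟨rfl, hw⟩)

lemma fold_pat (c : Int) (rest q : List Int) (h : ¬ [1, 2, 3] <:+ rest) :
    List.foldl altStep (c, rest) (1 :: 2 :: 3 :: 1 :: q) = List.foldl altStep (c + 1, rest) q := by
  rw [List.foldl_cons, altStep_no_pop c rest 1 (fun hc => h hc.1),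
      List.foldl_cons, altStep_no_pop _ _ 2 (by simp),
      List.foldl_cons, altStep_no_pop _ _ 3 (by simp),
      List.foldl_cons,
      show ((rest ++ [1]) ++ [2]) ++ [3] = rest ++ [1, 2, 3] by simp,
      altStep_pop]

-- a suffix that reaches past an appended block comes from a suffix of the left part
lemma suffix_append_split {l x y : List Int} (h : l <:+ x ++ y) (hlen : y.length ≤ l.length) :
    ∃ s, s <:+ x ∧ l = s ++ y := by
  rw [List.suffix_iff_eq_drop] at h
  have hll : l.length ≤ x.length + y.length := by
    have := (List.suffix_iff_eq_drop.2 h)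
    have h2 := congrArg List.length h
    simp at h2
    omega
  rw [List.drop_append_of_le_length (by simp; omega)] at h
  exact ⟨x.drop ((x ++ y).length - l.length), List.drop_suffix _ _, h⟩

lemma inv_scan {rest ing : List Int} {a : Int} {tl : List Int} (hing : ing = a :: tl)
    (hInv : pvInv rest ing) (hA : ¬ [1, 2, 3, 1] <+: ing) : pvInv (rest ++ [a]) tl := by
  intro s hs hne
  obtain ⟨z, hz⟩ := hs           -- z ++ s = rest ++ [a]
  -- s = s' ++ [a] with s' <:+ rest
  have hdecomp : ∃ s', s' <:+ rest ∧ s = s' ++ [a] := by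
    have hlen : (1 : Nat) ≤ s.length := by
      cases s with
      | nil => exact absurd rfl hne
      | cons _ _ => simp
    obtain ⟨s', hs', heq⟩ := suffix_append_split (⟨z, hz⟩ : s <:+ rest ++ [a]) (by simpa using hlen)
    exact ⟨s', hs', heq⟩
  obtain ⟨s', hs', rfl⟩ := hdecomp
  intro hpat
  have : [1, 2, 3, 1] <+: s' ++ ing := by
    rw [hing, show s' ++ (a :: tl) = (s' ++ [a]) ++ tl by simp]
    exact hpat
  rcases List.eq_nil_or_concat s' with h0 | _
  · subst h0
    simp at this
    exact hA this
  · exact hInv s' hs' (by rename_i h; obtain ⟨l', a', rfl⟩ := h; simp) this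

lemma pat_prefix_of_append {x y : List Int} (h : [1, 2, 3, 1] <+: x ++ y) (hx : 4 ≤ x.length) :
    [1, 2, 3, 1] <+: x := by
  have := List.prefix_iff_eq_take.1 h
  rw [show ([1, 2, 3, 1] : List Int).length = 4 by simp,
      List.take_append_of_le_length hx] at this
  rw [this]
  exact List.take_prefix _ _

-- the inner 'for' loop of A, related to B's fold
lemma inner_spec : ∀ (ing : List Int) (cnt : Int) (rest : List Int), pvInv rest ing →
    (solInner ing.length cnt ing rest = some (Sum.inr cnt) ∧
      List.foldl altStep (cnt, rest) ing = (cnt, rest ++ ing))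
  ∨ (∃ ing' rest', solInner ing.length cnt ing rest = some (Sum.inl (cnt + 1, ing', rest')) ∧
      pvInv rest' ing' ∧ ing'.length + rest'.length + 4 = ing.length + rest.length ∧
      List.foldl altStep (cnt, rest) ing = List.foldl altStep (cnt + 1, rest') ing')
  ∨ (solInner ing.length cnt ing rest = none ∧
      List.foldl altStep (cnt, rest) ing = (cnt, rest ++ ing) ∧ [1, 2, 3] <:+ rest ++ ing) := by
  intro ing
  induction ing with
  | nil =>
    intro cnt rest _hInv
    left
    exact ⟨rfl, by simp⟩
  | cons x0 tl ih =>
    intro cnt rest hInv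
    -- the common scan step: popleft + append to rest, then the induction hypothesis
    have scanKey : (¬ [1, 2, 3, 1] <+: (x0 :: tl)) →
        solInner (x0 :: tl).length cnt (x0 :: tl) rest = solInner tl.length cnt tl (rest ++ [x0]) →
        ((solInner (x0 :: tl).length cnt (x0 :: tl) rest = some (Sum.inr cnt) ∧
          List.foldl altStep (cnt, rest) (x0 :: tl) = (cnt, rest ++ (x0 :: tl)))
      ∨ (∃ ing' rest', solInner (x0 :: tl).length cnt (x0 :: tl) rest = some (Sum.inl (cnt + 1, ing', rest')) ∧
          pvInv rest' ing' ∧ ing'.length + rest'.length + 4 = (x0 :: tl).length + rest.length ∧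
          List.foldl altStep (cnt, rest) (x0 :: tl) = List.foldl altStep (cnt + 1, rest') ing')
      ∨ (solInner (x0 :: tl).length cnt (x0 :: tl) rest = none ∧
          List.foldl altStep (cnt, rest) (x0 :: tl) = (cnt, rest ++ (x0 :: tl)) ∧
          [1, 2, 3] <:+ rest ++ (x0 :: tl))) := by
      intro hA heq
      have hInv' : pvInv (rest ++ [x0]) tl := inv_scan rfl hInv hA
      have hstep : altStep (cnt, rest) x0 = (cnt, rest ++ [x0]) := by
        apply altStep_no_pop
        rintro ⟨hs, rfl⟩
        exact hInv [1, 2, 3] hs (by simp) ⟨tl, rfl⟩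
      rcases ih cnt (rest ++ [x0]) hInv' with ⟨h1, h2⟩ | ⟨ing', rest', h1, h2, h3, h4⟩ | ⟨h1, h2, h3⟩
      · left
        refine ⟨by rw [heq]; exact h1, ?_⟩
        rw [List.foldl_cons, hstep, h2]
        simp
      · right; left
        refine ⟨ing', rest', by rw [heq]; exact h1, h2, ?_, ?_⟩
        · simp only [List.length_append, List.length_cons, List.length_nil] at h3 ⊢
          omega
        · rw [List.foldl_cons, hstep, h4]
      · right; right
        refine ⟨by rw [heq]; exact h1, ?_, ?_⟩
        · rw [List.foldl_cons, hstep, h2]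
          simp
        · rw [show rest ++ (x0 :: tl) = (rest ++ [x0]) ++ tl by simp]
          exact h3
    match tl with
    | [] =>
      exact scanKey (fun hp => by have := hp.length_le; simp at this) rfl
    | [x1] =>
      exact scanKey (fun hp => by have := hp.length_le; simp at this) rfl
    | x1 :: x2 :: tl' =>
      by_cases hc : x0 = 1 ∧ x1 = 2 ∧ x2 = 3
      · obtain ⟨rfl, rfl, rfl⟩ := hc
        match tl' with
        | [] =>
          -- ingredient is exactly [1, 2, 3]: ingredient[3] raises IndexError
          right; right
          refine ⟨by simp [solInner], ?_, ⟨rest, rfl⟩⟩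
          apply foldl_no_pop
          intro w hw hpat
          have hwlen : w.length ≤ 3 := by have := hw.length_le; simpa using this
          obtain ⟨s, hs, hse⟩ := suffix_append_split hpat (by simp; omega)
          have hsne : s ≠ [] := by
            rintro rfl
            have hl := congrArg List.length hse
            simp at hl
            omega
          obtain ⟨w', hw'⟩ := hw
          refine hInv s hs hsne ⟨w', ?_⟩
          rw [show s ++ [1, 2, 3] = s ++ (w ++ w') by rw [hw'], ← List.append_assoc, ← hse]
        | x3 :: tl'' =>
          by_cases hx3 : x3 = 1
          · subst hx3
            -- the pattern sits at the front: cnt += 1, pop 4, restore from rest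
            have hnr : ¬ [1, 2, 3] <:+ rest :=
              fun hs => hInv [1, 2, 3] hs (by simp) ⟨2 :: 3 :: 1 :: tl'', rfl⟩
            have hfold := fold_pat cnt rest tl'' hnr
            by_cases hlen : 4 < rest.length
            · right; left
              refine ⟨rest.drop (rest.length - 4) ++ tl'', rest.take (rest.length - 4),
                by simp [solInner, hlen], ?_, ?_, ?_⟩
              · intro s hs hne hpat
                obtain ⟨u, hu⟩ := hs
                have hkey : (s ++ rest.drop (rest.length - 4)) <:+ rest :=
                  ⟨u, by rw [← List.append_assoc, hu, List.take_append_drop]⟩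
                have hlen4 : (rest.drop (rest.length - 4)).length = 4 := by simp; omega
                have hp : [1, 2, 3, 1] <+: s ++ rest.drop (rest.length - 4) := by
                  apply pat_prefix_of_append (y := tl'')
                  · rw [List.append_assoc]; exact hpat
                  · simp only [List.length_append, hlen4]; omega
                refine hInv _ hkey ?_ (hp.trans (List.prefix_append _ _))
                intro h0
                simp at h0
                omega
              · simp only [List.length_append, List.length_cons, List.length_take,
                  List.length_drop]
                omega
              · rw [hfold, List.foldl_append,
                  foldl_no_pop (rest.drop (rest.length - 4)) (rest.take (rest.length - 4))
                    (cnt + 1) ?nop]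
                · rw [List.take_append_drop]
                case nop =>
                  intro w hw
                  apply inv_no_pat_prefix hInv
                  have h5 : rest.take (rest.length - 4) ++ w <+:
                      rest.take (rest.length - 4) ++ rest.drop (rest.length - 4) :=
                    (List.prefix_append_right_inj _).2 hw
                  rwa [List.take_append_drop] at h5
            · right; left
              refine ⟨rest ++ tl'', [], by simp [solInner, hlen], pvInv_nil _, ?_, ?_⟩
              · simp only [List.length_append, List.length_cons, List.length_nil]
                omega
              · rw [hfold, List.foldl_append,
                  foldl_no_pop rest [] (cnt + 1)
                    (fun w hw => by simpa using inv_no_pat_prefix hInv w hw)]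
                simp
          · -- ingredient[3] ≠ 1
            apply scanKey
            · rintro ⟨t, ht⟩
              injection ht with e1 ht; injection ht with e2 ht
              injection ht with e3 ht; injection ht with e4 ht
              exact hx3 e4.symm
            · simp [solInner, hx3]
      · -- first three are not 1, 2, 3
        apply scanKey
        · rintro ⟨t, ht⟩
          injection ht with e1 ht; injection ht with e2 ht
          injection ht with e3 ht
          exact hc ⟨e1.symm, e2.symm, e3.symm⟩
        · simp [solInner, hc]

lemma outer_spec : ∀ (fuel : Nat) (cnt : Int) (ing rest : List Int), pvInv rest ing →
    ing.length + rest.length < 4 * fuel →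
    (solOuter fuel cnt ing rest = some (List.foldl altStep (cnt, rest) ing).1)
  ∨ (solOuter fuel cnt ing rest = none ∧
      [1, 2, 3] <:+ (List.foldl altStep (cnt, rest) ing).2) := by
  intro fuel
  induction fuel with
  | zero => intro cnt ing rest _ hlt; omega
  | succ f ih =>
    intro cnt ing rest hInv hlt
    rcases inner_spec ing cnt rest hInv with ⟨hrun, hfold⟩ | ⟨ing', rest', hrun, hInv', hlen, hfold⟩ | ⟨hrun, hfold, hsuf⟩
    · left
      simp [solOuter, hrun, hfold]
    · have : solOuter (f + 1) cnt ing rest = solOuter f (cnt + 1) ing' rest' := by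
        simp [solOuter, hrun]
      rw [this, hfold]
      exact ih (cnt + 1) ing' rest' hInv' (by omega)
    · right
      constructor
      · simp [solOuter, hrun]
      · rw [hfold]; exact hsuf

lemma foldl_altStep_snd : ∀ (l : List Int) (p : Int × List Int),
    (List.foldl altStep p l).2 = List.foldl collapse p.2 l := by
  intro l
  induction l with
  | nil => intro p; simp
  | cons x l' ih =>
    intro p
    rw [List.foldl_cons, List.foldl_cons, ih]
    congr 1
    obtain ⟨c, st⟩ := p
    simp only [altStep, collapse]
    split <;> rfl

-- ===== VERDICT (by name: the statement is the Claim_ definition above) =====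
theorem solution_spec : Claim_equal_solution := by
  intro ing _hdom hpre
  unfold Spec_solution solution solution_alt
  rcases outer_spec (ing.length + 1) 0 ing [] (pvInv_nil ing) (by simp only [List.length_nil]; omega) with h | ⟨_, hsuf⟩
  · rw [h]; rfl
  · exfalso
    apply hpre
    rw [foldl_altStep_snd ing (0, [])] at hsuf
    exact hsuf
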